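-- pv_equiv track=rewrite | github.com/ayyoanil/Python | fname-lname.py | adjust_length
-- ===== SOURCE A (Python) =====
-- def adjust_length(name, length_limit):
--     name_length = len(name)
--     ret_name = name
--     if name_length > length_limit:
--         word_list = name.split()
--         word_count = len(word_list)
--         last_found = False
--         delete_indexes = []
--
--         count = 1
--         for word in  word_list[::-1]:
--             if last_found is False:
--                 # find last multi-letter word in name
--                 # Once found retain the last multi-letter word along with initials at end if any
--                 if len(word) > 1:
--                     last_word = ' '.join(word_list[-count:])
--                     last_found = True
--             else:
--                 # check if deleting words will reduce the size within limit
--                 # note down index to be deleted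
--                 delete_indexes.append(count)
--                 if name_length - (len(word) + 1) <= length_limit:
--                     break
--                 name_length = name_length - (len(word) + 1)
--
--             count += 1
--
--         #delete all the identified words in the list
--         for index in delete_indexes:
--             word_list[word_count-index] = ''
--         word_list = [val for val in word_list if val]
--
--         ret_name = ' '.join(word_list)
--
--     return ret_name
-- ===== SOURCE B (Python) =====
-- def adjust_length(name, length_limit):
--     if len(name) <= length_limit:
--         return name
--     words = name.split()
--     pivot = max((k for k, w in enumerate(words) if len(w) > 1), default=None)
--     if pivot is None:
--         return ' '.join(words)
--     # cumulative cost of dropping trailing prefix words, back to front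
--     cums = []
--     acc = 0
--     for w in reversed(words[:pivot]):
--         acc += len(w) + 1
--         cums.append(acc)
--     m = next((j + 1 for j, c in enumerate(cums) if len(name) - c <= length_limit), pivot)
--     return ' '.join(words[:pivot - m] + words[pivot:])
-- ===== Notes on version B (the rewrite author's own statement) =====
-- stated objective: alternative
-- what changed: Replaces A's single stateful reversed scan (last-found flag, deferred delete-index list, in-place blanking then refiltering) by a direct decomposition: find the pivot index of the last multi-letter word, build a cumulative drop-cost table over the prefix, pick the drop count by a first-hit scan of that table, and rebuild the name from two slices.
import Mathlib
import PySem

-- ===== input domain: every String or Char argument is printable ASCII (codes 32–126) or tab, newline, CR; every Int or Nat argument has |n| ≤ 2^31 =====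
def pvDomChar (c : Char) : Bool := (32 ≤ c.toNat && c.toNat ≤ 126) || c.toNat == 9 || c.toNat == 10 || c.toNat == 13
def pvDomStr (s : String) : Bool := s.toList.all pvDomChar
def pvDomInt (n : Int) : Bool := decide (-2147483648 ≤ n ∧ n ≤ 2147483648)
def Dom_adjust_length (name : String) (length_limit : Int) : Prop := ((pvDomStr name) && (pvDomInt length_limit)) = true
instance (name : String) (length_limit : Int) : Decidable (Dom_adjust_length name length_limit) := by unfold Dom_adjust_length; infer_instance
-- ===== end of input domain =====

-- B re-derives the trimmed name from a pivot index and a cumulative-cost table instead of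
-- A's single stateful reversed scan with deferred index blanking; objective: alternative.

-- ===== PORT A =====
-- the 'for word in word_list[::-1]' loop with its break; state = (name_length, last_found, delete_indexes),
-- count is the running 1-based position from the end.  The local 'last_word' of A is dead (never read) and is not carried.
def adjustLoopA (limit : Int) : List String → Int → Bool → List Int → Int → Int × Bool × List Int
  | [], name_length, last_found, dels, _count => (name_length, last_found, dels)
  | word :: rest, name_length, last_found, dels, count =>
    if last_found = false then
      if ((PySem.Str.len word : Int) > 1) then
        adjustLoopA limit rest name_length true dels (count + 1)
      else
        adjustLoopA limit rest name_length false dels (count + 1)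
    else
      let dels' := dels ++ [count]
      if name_length - ((PySem.Str.len word : Int) + 1) ≤ limit then
        (name_length, last_found, dels')          -- break
      else
        adjustLoopA limit rest (name_length - ((PySem.Str.len word : Int) + 1)) last_found dels' (count + 1)

def adjust_length (name : String) (length_limit : Int) : String :=
  let name_length : Int := (PySem.Str.len name : Int)
  let ret_name := name
  if name_length > length_limit then
    let word_list := PySem.Str.split₀ name
    let word_count : Int := (word_list.length : Int)
    let rev := (PySem.List.slice? word_list none none (-1)).getD []   -- word_list[::-1]; step -1 ≠ 0 so always some
    let st := adjustLoopA length_limit rev name_length false [] 1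
    let dels := st.2.2
    -- word_list[word_count - index] = '' : index is always in range here, pySetD is the total form
    let word_list := dels.foldl (fun ws idx => PySem.List.pySetD ws (word_count - idx) "") word_list
    let word_list := word_list.filter (fun v => v ≠ "")   -- [val for val in word_list if val]; str truthiness = nonempty
    PySem.Str.join " " word_list
  else ret_name

-- ===== PORT B =====
-- max((k for k, w in enumerate(words) if len(w) > 1), default=None)
def altPivot (words : List String) : Option Int :=
  (PySem.List.enumerate words 0).foldl
    (fun acc kw =>
      if ((PySem.Str.len kw.2 : Int) > 1) then
        match acc with
        | none => some kw.1
        | some m => some (max m kw.1)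
      else acc) none

def adjust_length_alt (name : String) (length_limit : Int) : String :=
  if (PySem.Str.len name : Int) ≤ length_limit then name
  else
    let words := PySem.Str.split₀ name
    match altPivot words with
    | none => PySem.Str.join " " words
    | some pivot =>
      -- cums: cumulative cost of dropping trailing prefix words, back to front
      let cums := ((PySem.List.slice words none (some pivot)).reverse.foldl
        (fun (p : List Int × Int) w =>
          let acc := p.2 + (PySem.Str.len w : Int) + 1
          (p.1 ++ [acc], acc)) ([], 0)).1
      -- next((j + 1 for j, c in enumerate(cums) if len(name) - c <= length_limit), pivot)
      let m := ((PySem.List.enumerate cums 0).findSome?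
        (fun jc => if (PySem.Str.len name : Int) - jc.2 ≤ length_limit then some (jc.1 + 1) else none)).getD pivot
      PySem.Str.join " "
        (PySem.List.slice words none (some (pivot - m)) ++ PySem.List.slice words (some pivot) none)

-- ===== PRECONDITION & SPEC =====
def Spec_adjust_length (name : String) (length_limit : Int) (out : String) : Prop := out = adjust_length_alt name length_limit
instance (name : String) (length_limit : Int) (out : String) : Decidable (Spec_adjust_length name length_limit out) := by unfold Spec_adjust_length; infer_instance

-- ===== CLAIM (what is proved, stated in full; the proofs are below) =====
def Claim_equal_adjust_length : Prop := ∀ (name : String) (length_limit : Int), Dom_adjust_length name length_limit → Spec_adjust_length name length_limit (adjust_length name length_limit)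

-- ===== LEMMAS AND PROOFS =====

-- the number of prefix words A's loop deletes / B's scan drops, as one recursion
def dropCount (limit : Int) : List String → Int → Nat
  | [], _ => 0
  | w :: t, L =>
    if L - ((PySem.Str.len w : Int) + 1) ≤ limit then 1
    else dropCount limit t (L - ((PySem.Str.len w : Int) + 1)) + 1

theorem dropCount_le (limit : Int) (l : List String) (L : Int) : dropCount limit l L ≤ l.length := by
  induction l generalizing L with
  | nil => simp [dropCount]
  | cons w t ih =>
    simp only [dropCount, List.length_cons]
    split_ifs
    · omega
    · exact Nat.succ_le_succ (ih _)

-- A's loop, before the pivot: single-letter words are skipped, count advances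
theorem adjustLoopA_phase1 (limit : Int) (pre : List String)
    (hpre : ∀ w ∈ pre, ¬ ((PySem.Str.len w : Int) > 1)) (piv : String)
    (hpiv : (PySem.Str.len piv : Int) > 1) (rest : List String) (L : Int) (dels : List Int) (c : Int) :
    adjustLoopA limit (pre ++ piv :: rest) L false dels c
      = adjustLoopA limit rest L true dels (c + pre.length + 1) := by
  induction pre generalizing c with
  | nil =>
    simp only [List.nil_append, adjustLoopA, if_pos hpiv, List.length_nil]
    norm_num
  | cons w t ih =>
    have hw := hpre w (by simp)
    simp only [List.cons_append, adjustLoopA, if_neg hw]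
    rw [ih (fun x hx => hpre x (by simp [hx])) (c + 1)]
    have harg : c + 1 + (t.length : Int) + 1 = c + ((w :: t).length : Int) + 1 := by
      push_cast [List.length_cons]; ring
    rw [harg]
    simp

-- A's loop when no multi-letter word ever appears: nothing is recorded
theorem adjustLoopA_no_pivot (limit : Int) (l : List String)
    (h : ∀ w ∈ l, ¬ ((PySem.Str.len w : Int) > 1)) (L : Int) (dels : List Int) (c : Int) :
    (adjustLoopA limit l L false dels c).2.2 = dels := by
  induction l generalizing c with
  | nil => simp [adjustLoopA]
  | cons w t ih =>
    simp only [adjustLoopA, if_neg (h w (by simp))]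
    exact ih (fun x hx => h x (by simp [hx])) (c + 1)

-- A's loop, after the pivot: it records the consecutive counts c, c+1, …, c + dropCount - 1
theorem adjustLoopA_phase2 (limit : Int) (l : List String) (L : Int) (dels : List Int) (c : Int) :
    (adjustLoopA limit l L true dels c).2.2
      = dels ++ (List.range (dropCount limit l L)).map (fun j : Nat => c + (j : Int)) := by
  induction l generalizing L dels c with
  | nil => simp [adjustLoopA, dropCount]
  | cons w t ih =>
    simp only [adjustLoopA, dropCount]
    rw [if_neg (by simp)]
    split_ifs with h
    · simp
    · rw [ih, List.range_succ_eq_map, List.map_cons, List.map_map, List.append_assoc,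
        List.singleton_append]
      simp only [Nat.cast_zero, add_zero]
      congr 2
      apply List.map_congr_left
      intro j _
      simp only [Function.comp_apply]
      push_cast
      ring

-- blanking the last M slots of F inside F ++ T
theorem blank_fold (F T : List String) (M : Nat) (hM : M ≤ F.length) :
    ((List.range M).foldl (fun ws (j : Nat) => PySem.List.pySetD ws ((F.length : Int) - 1 - (j : Int)) "") (F ++ T))
      = F.take (F.length - M) ++ List.replicate M "" ++ T := by
  induction M with
  | zero => simp
  | succ M ih =>
    rw [List.range_succ, List.foldl_append, ih (by omega)]
    simp only [List.foldl_cons, List.foldl_nil]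
    have hidx : (F.length : Int) - 1 - (M : Int) = ((F.length - 1 - M : Nat) : Int) := by omega
    rw [hidx, PySem.List.pySetD_natCast]
    have hlt : F.length - 1 - M < (F.take (F.length - M)).length := by
      simp only [List.length_take]
      omega
    rw [List.append_assoc, List.set_append, if_pos hlt,
        List.set_eq_take_append_cons_drop, if_pos hlt]
    have hd : List.drop (F.length - 1 - M + 1) (F.take (F.length - M)) = [] := by
      apply List.drop_eq_nil_of_le
      simp only [List.length_take]
      omega
    rw [hd, List.take_take]
    have h1 : min (F.length - 1 - M) (F.length - M) = F.length - (M + 1) := by omega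
    have h2 : F.length - 1 - M = F.length - (M + 1) := by omega
    rw [h1]
    simp [List.replicate_succ, List.append_assoc]

theorem filter_blank (F T : List String) (k M : Nat)
    (hF : ∀ w ∈ F, w ≠ "") (hT : ∀ w ∈ T, w ≠ "") :
    (F.take k ++ List.replicate M "" ++ T).filter (fun v => v ≠ "") = F.take k ++ T := by
  have h1 : (F.take k).filter (fun v => v ≠ "") = F.take k :=
    List.filter_eq_self.mpr (fun a ha => by simpa using hF a (List.mem_of_mem_take ha))
  have h3 : T.filter (fun v => v ≠ "") = T :=
    List.filter_eq_self.mpr (fun a ha => by simpa using hT a ha)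
  have h2 : (List.replicate M "").filter (fun v => v ≠ "") = [] := by
    induction M with
    | zero => rfl
    | succ m ihm => simp [List.replicate_succ]
  rw [List.append_assoc, List.filter_append, List.filter_append, h1, h2, h3]
  rfl

-- every word produced by str.split() is nonempty
theorem split₀_go_ne_nil (s cur : List Char) (acc : List (List Char))
    (hacc : ∀ w ∈ acc, w ≠ []) :
    ∀ w ∈ PySem.Chars.split₀.go s cur acc, w ≠ [] := by
  induction s generalizing cur acc with
  | nil =>
    intro w hw
    simp only [PySem.Chars.split₀.go] at hw
    split_ifs at hw with hc
    · exact hacc w (List.mem_reverse.mp hw)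
    · rcases List.mem_cons.mp (List.mem_reverse.mp hw) with rfl | h
      · simp only [ne_eq, List.reverse_eq_nil_iff]
        intro hnil
        exact hc (by simp [hnil])
      · exact hacc w h
  | cons c rest ih =>
    intro w hw
    simp only [PySem.Chars.split₀.go] at hw
    split_ifs at hw with h1 h2
    · exact ih [] acc hacc w hw
    · refine ih [] (cur.reverse :: acc) ?_ w hw
      intro x hx
      rcases List.mem_cons.mp hx with rfl | hx
      · simp only [ne_eq, List.reverse_eq_nil_iff]
        intro hnil
        exact h2 (by simp [hnil])
      · exact hacc x hx
    · exact ih (c :: cur) acc hacc w hw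

theorem split₀_ne_empty (name : String) : ∀ w ∈ PySem.Str.split₀ name, w ≠ "" := by
  intro w hw
  simp only [PySem.Str.split₀, List.mem_map] at hw
  obtain ⟨cs, hcs, rfl⟩ := hw
  have hne : cs ≠ [] := split₀_go_ne_nil _ _ _ (by simp) cs hcs
  intro h
  apply hne
  have := congrArg String.toList h
  simpa using this

-- B's pivot fold: skipping trailing single-letter words
theorem altPivotFold_singles (Q : List String) (hQ : ∀ w ∈ Q, ¬ ((PySem.Str.len w : Int) > 1))
    (s : Int) (acc : Option Int) :
    (PySem.List.enumerate Q s).foldl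
      (fun acc kw =>
        if ((PySem.Str.len kw.2 : Int) > 1) then
          match acc with
          | none => some kw.1
          | some m => some (max m kw.1)
        else acc) acc = acc := by
  induction Q generalizing s acc with
  | nil => simp [PySem.List.enumerate_nil]
  | cons w t ih =>
    rw [PySem.List.enumerate_cons, List.foldl_cons]
    have hw := hQ w (by simp)
    simp only [if_neg hw]
    exact ih (fun x hx => hQ x (by simp [hx])) (s + 1) acc

theorem altPivotFold_bound (R : List String) (s : Int) (acc : Option Int)
    (hacc : ∀ j, acc = some j → j < s) :
    ∀ j, ((PySem.List.enumerate R s).foldl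
      (fun acc kw =>
        if ((PySem.Str.len kw.2 : Int) > 1) then
          match acc with
          | none => some kw.1
          | some m => some (max m kw.1)
        else acc) acc) = some j → j < s + R.length := by
  induction R generalizing s acc with
  | nil =>
    intro j hj
    simp only [PySem.List.enumerate_nil, List.foldl_nil] at hj
    have := hacc j hj
    simp only [List.length_nil]
    omega
  | cons w t ih =>
    intro j hj
    rw [PySem.List.enumerate_cons, List.foldl_cons] at hj
    have hstep :
        ∀ k, (if ((PySem.Str.len w : Int) > 1) then
            (match acc with
              | none => some (s : Int)
              | some m => some (max m s)) else acc) = some k → k < s + 1 := by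
      intro k hk
      split_ifs at hk
      · match acc, hk with
        | none, hk => simp at hk; omega
        | some m, hk =>
          simp at hk
          have := hacc m rfl
          omega
      · have := hacc k hk
        omega
    have := ih (s + 1) _ hstep j hj
    simp only [List.length_cons] at *
    push_cast at *
    omega

theorem altPivot_eq (R : List String) (piv : String) (Q : List String)
    (hpiv : (PySem.Str.len piv : Int) > 1) (hQ : ∀ w ∈ Q, ¬ ((PySem.Str.len w : Int) > 1)) :
    altPivot (R ++ piv :: Q) = some (R.length : Int) := by
  unfold altPivot
  rw [PySem.List.enumerate_append, List.foldl_append, PySem.List.enumerate_cons, List.foldl_cons]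
  simp only [zero_add]
  rw [if_pos hpiv]
  rw [altPivotFold_singles Q hQ]
  have hbound := altPivotFold_bound R 0 none (by intro j h; cases h)
  cases hacc : List.foldl
      (fun (acc : Option Int) (kw : Int × String) =>
        if ((PySem.Str.len kw.2 : Int) > 1) then
          (match acc with
            | none => some kw.1
            | some m => some (max m kw.1))
        else acc) none (PySem.List.enumerate R 0) with
  | none => rfl
  | some m =>
    simp only [Option.some.injEq]
    have hm := hbound m hacc
    omega

-- B's cumulative table, recursively
def cumsRec : List String → Int → List Int
  | [], _ => []
  | w :: t, a => (a + (PySem.Str.len w : Int) + 1) :: cumsRec t (a + (PySem.Str.len w : Int) + 1)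

theorem cums_fold_eq (l : List String) (init : List Int) (a : Int) :
    (l.foldl (fun (p : List Int × Int) w =>
        (p.1 ++ [p.2 + (PySem.Str.len w : Int) + 1], p.2 + (PySem.Str.len w : Int) + 1)) (init, a)).1
      = init ++ cumsRec l a := by
  induction l generalizing init a with
  | nil => simp [cumsRec]
  | cons w t ih =>
    rw [List.foldl_cons]
    simp only []
    rw [ih]
    simp [cumsRec, List.append_assoc]

theorem findSome_cums (limit L : Int) (l : List String) (s a : Int) :
    (((PySem.List.enumerate (cumsRec l a) s).findSome?
        (fun jc => if L - jc.2 ≤ limit then some (jc.1 + 1) else none)).getD (s + l.length))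
      = s + (dropCount limit l (L - a) : Int) := by
  induction l generalizing s a with
  | nil => simp [cumsRec, dropCount, PySem.List.enumerate_nil]
  | cons w t ih =>
    simp only [cumsRec, PySem.List.enumerate_cons, List.findSome?_cons, dropCount]
    by_cases hc : L - (a + (PySem.Str.len w : Int) + 1) ≤ limit
    · rw [if_pos hc, if_pos (by omega : L - a - ((PySem.Str.len w : Int) + 1) ≤ limit)]
      simp
    · rw [if_neg hc, if_neg (by omega : ¬ L - a - ((PySem.Str.len w : Int) + 1) ≤ limit)]
      have hdef : s + ((w :: t).length : Int) = (s + 1) + (t.length : Int) := by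
        push_cast [List.length_cons]; ring
      rw [hdef]
      have harg : L - a - ((PySem.Str.len w : Int) + 1) = L - (a + (PySem.Str.len w : Int) + 1) := by
        ring
      rw [harg]
      rw [ih (s + 1) (a + (PySem.Str.len w : Int) + 1)]
      push_cast
      ring

-- split a list at its last multi-letter word, if any
theorem decomp_last_multi (l : List String) :
    (∀ w ∈ l, ¬ ((PySem.Str.len w : Int) > 1)) ∨
      ∃ pre piv rest, l = pre ++ piv :: rest ∧ (∀ w ∈ pre, ¬ ((PySem.Str.len w : Int) > 1)) ∧
        ((PySem.Str.len piv : Int) > 1) := by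
  induction l with
  | nil => left; simp
  | cons w t ih =>
    by_cases hw : (PySem.Str.len w : Int) > 1
    · right; exact ⟨[], w, t, by simp, by simp, hw⟩
    · rcases ih with h | ⟨pre, piv, rest, h1, h2, h3⟩
      · left
        intro x hx
        rcases List.mem_cons.mp hx with rfl | hx
        · exact hw
        · exact h x hx
      · right
        refine ⟨w :: pre, piv, rest, by simp [h1], ?_, h3⟩
        intro x hx
        rcases List.mem_cons.mp hx with rfl | hx
        · exact hw
        · exact h2 x hx

theorem altPivot_none (ws : List String) (h : ∀ w ∈ ws, ¬ ((PySem.Str.len w : Int) > 1)) :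
    altPivot ws = none := by
  unfold altPivot
  exact altPivotFold_singles ws h 0 none

-- ===== VERDICT (by name: the statement is the Claim_ definition above) =====
theorem adjust_length_spec : Claim_equal_adjust_length := by
  unfold Claim_equal_adjust_length Spec_adjust_length
  intro name limit _hdom
  unfold adjust_length adjust_length_alt
  by_cases hL : ((PySem.Str.len name : Int) > limit)
  case neg =>
    rw [if_neg hL, if_pos (by omega)]
  case pos =>
    rw [if_pos hL, if_neg (by omega)]
    dsimp only
    have hWne : ∀ w ∈ PySem.Str.split₀ name, w ≠ "" := split₀_ne_empty name
    rw [PySem.List.slice?_none_none_neg_one, Option.getD_some]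
    rcases decomp_last_multi (PySem.Str.split₀ name).reverse with hall | ⟨pre, piv, rest, hdec, hpre, hpiv⟩
    · -- no multi-letter word: A records nothing, B finds no pivot
      rw [adjustLoopA_no_pivot limit _ hall, altPivot_none _ (by
        intro w hw; exact hall w (List.mem_reverse.mpr hw))]
      rw [List.foldl_nil]
      rw [List.filter_eq_self.mpr (fun a ha => by simpa using hWne a ha)]
    · have hws : PySem.Str.split₀ name = rest.reverse ++ piv :: pre.reverse := by
        have h := congrArg List.reverse hdec
        simpa using h
      have hQ : ∀ w ∈ pre.reverse, ¬ ((PySem.Str.len w : Int) > 1) :=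
        fun w hw => hpre w (List.mem_reverse.mp hw)
      rw [hws]
      have hrev : (rest.reverse ++ piv :: pre.reverse).reverse = pre ++ piv :: rest := by simp
      rw [hrev]
      rw [adjustLoopA_phase1 limit pre hpre piv hpiv rest _ _ 1]
      rw [adjustLoopA_phase2]
      rw [altPivot_eq rest.reverse piv pre.reverse hpiv hQ]
      dsimp only
      simp only [List.nil_append, List.length_reverse]
      -- B side: the slices and the scan collapse
      have hsl1 : PySem.List.slice (rest.reverse ++ piv :: pre.reverse) none
          (some ((rest.length : Nat) : Int)) = rest.reverse := by
        rw [PySem.List.slice_to _ (by positivity)]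
        rw [Int.toNat_natCast]
        rw [List.take_append_of_le_length (by simp)]
        simp
      rw [hsl1, List.reverse_reverse]
      rw [cums_fold_eq rest ([] : List Int) 0]
      simp only [List.nil_append]
      have hfs : ((PySem.List.enumerate (cumsRec rest 0) 0).findSome?
            (fun jc => if (PySem.Str.len name : Int) - jc.2 ≤ limit then some (jc.1 + 1) else none)).getD
            ((rest.length : Nat) : Int)
          = ((dropCount limit rest (PySem.Str.len name) : Nat) : Int) := by
        have h := findSome_cums limit (PySem.Str.len name) rest 0 0
        simpa using h
      rw [hfs]
      set M : Nat := dropCount limit rest ((PySem.Str.len name : Int)) with hMdef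
      have hMle : M ≤ rest.length := dropCount_le _ _ _
      have hsl2 : PySem.List.slice (rest.reverse ++ piv :: pre.reverse) none
          (some (((rest.length : Nat) : Int) - ((M : Nat) : Int))) = rest.reverse.take (rest.length - M) := by
        have hc : ((rest.length : Nat) : Int) - ((M : Nat) : Int) = ((rest.length - M : Nat) : Int) := by
          omega
        rw [hc, PySem.List.slice_to _ (by positivity), Int.toNat_natCast]
        rw [List.take_append_of_le_length (by simp only [List.length_reverse]; omega)]
      rw [hsl2]
      have hsl3 : PySem.List.slice (rest.reverse ++ piv :: pre.reverse)
          (some ((rest.length : Nat) : Int)) none = piv :: pre.reverse := by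
        rw [PySem.List.slice_from _ (by positivity), Int.toNat_natCast]
        rw [show rest.length = rest.reverse.length by simp, List.drop_left]
      rw [hsl3]
      -- A side: the recorded indexes blank exactly those slots
      rw [List.foldl_map]
      rw [PySem.List.foldl_congr_mem _ _
        (fun ws (j : Nat) => PySem.List.pySetD ws ((rest.reverse.length : Int) - 1 - (j : Int)) "") _
        (by
          intro acc x hx
          have harg : ((rest.reverse ++ piv :: pre.reverse).length : Int) - (1 + (pre.length : Int) + 1 + (x : Int))
              = ((rest.reverse.length : Int) - 1 - (x : Int)) := by
            simp only [List.length_append, List.length_cons, List.length_reverse]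
            push_cast
            ring
          rw [harg])]
      rw [blank_fold rest.reverse (piv :: pre.reverse) M (by simp [hMle])]
      have hWne' : ∀ w ∈ rest.reverse ++ piv :: pre.reverse, w ≠ "" := by
        rw [← hws]; exact hWne
      rw [filter_blank rest.reverse (piv :: pre.reverse) _ M
        (fun w hw => hWne' w (List.mem_append_left _ hw))
        (fun w hw => hWne' w (List.mem_append_right _ hw))]
      simp
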